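-- pv_equiv track=rewrite | github.com/Ionitedev/ivis-youtrending | app/util.py | rank_map
-- ===== SOURCE A (Python) =====
-- def rank_map(counters, reverse=False):
--     values = sorted(set(counters.values()), reverse=reverse)
--     value_counter = {v: 0 for v in values}
--     for i in counters:
--         value_counter[counters[i]] += 1
--
--     for i in range(1, len(values)):
--         value_counter[values[i]] += value_counter[values[i - 1]]
--
--     return value_counter
-- ===== SOURCE B (Python) =====
-- def rank_map(counters, reverse=False):
--     result = {}
--     running = 0
--     for v in sorted(counters.values(), reverse=reverse):
--         running += 1
--         result[v] = running
--     return result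
-- ===== Notes on version B (the rewrite author's own statement) =====
-- stated objective: simpler
-- what changed: Replaces A's three phases (sort the distinct value set, count occurrences into a zero-initialised dict, then prefix-sum across the distinct values by index) with one pass over the full sorted value list (duplicates kept) maintaining a single running counter whose last write per value is already its cumulative count.
import Mathlib
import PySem

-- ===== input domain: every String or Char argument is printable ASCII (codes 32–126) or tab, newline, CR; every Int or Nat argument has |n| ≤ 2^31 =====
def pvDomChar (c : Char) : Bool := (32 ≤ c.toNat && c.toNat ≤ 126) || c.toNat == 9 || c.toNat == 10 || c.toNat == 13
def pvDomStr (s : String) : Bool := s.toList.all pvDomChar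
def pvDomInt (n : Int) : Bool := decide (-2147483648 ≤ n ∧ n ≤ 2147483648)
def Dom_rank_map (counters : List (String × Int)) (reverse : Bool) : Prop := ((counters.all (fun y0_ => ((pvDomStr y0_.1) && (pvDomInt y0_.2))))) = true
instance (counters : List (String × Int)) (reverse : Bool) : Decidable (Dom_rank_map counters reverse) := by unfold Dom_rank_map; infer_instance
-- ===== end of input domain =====

-- B replaces A's sort-distinct/count/prefix-sum phases with one running-counter pass
-- over the full sorted value list (objective: simpler). No mutation is observable.

-- ===== PORT A =====
-- 'counters' (a Python dict) arrives as an association list; PySem.Dict.ofList is dict(counters).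
def rank_map (counters : List (String × Int)) (reverse : Bool) : List (Int × Int) :=
  let d : PySem.Dict String Int := PySem.Dict.ofList counters
  -- values = sorted(set(counters.values()), reverse=reverse)
  let values : List Int := PySem.List.sorted (PySem.Set.ofList (PySem.Dict.values d)) (fun x => x) reverse
  -- value_counter = {v: 0 for v in values}
  let vc0 : PySem.Dict Int Int := values.foldl (fun vc v => vc.insert v 0) PySem.Dict.empty
  -- for i in counters: value_counter[counters[i]] += 1
  -- (counters[i] and value_counter[...] are present keys, so getD/modify defaults are never used)
  let vc1 : PySem.Dict Int Int :=
    (PySem.Dict.keys d).foldl (fun vc i => vc.modify (PySem.Dict.getD d i 0) 0 (fun x => x + 1)) vc0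
  -- for i in range(1, len(values)): value_counter[values[i]] += value_counter[values[i - 1]]
  -- (indices are in range and both keys are present, so the pyGetD/getD defaults are never used)
  let vc2 : PySem.Dict Int Int :=
    (PySem.List.pyRange 1 (values.length : Int) 1).foldl
      (fun vc i =>
        vc.modify (PySem.List.pyGetD values i 0) 0
          (fun x => x + PySem.Dict.getD vc (PySem.List.pyGetD values (i - 1) 0) 0)) vc1
  PySem.Dict.items vc2

-- ===== PORT B =====
def rank_map_alt (counters : List (String × Int)) (reverse : Bool) : List (Int × Int) :=
  let d : PySem.Dict String Int := PySem.Dict.ofList counters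
  -- result = {}; running = 0
  -- for v in sorted(counters.values(), reverse=reverse): running += 1; result[v] = running
  let st : PySem.Dict Int Int × Int :=
    (PySem.List.sorted (PySem.Dict.values d) (fun x => x) reverse).foldl
      (fun st v => (st.1.insert v (st.2 + 1), st.2 + 1)) (PySem.Dict.empty, 0)
  PySem.Dict.items st.1

-- ===== PRECONDITION & SPEC =====
def Spec_rank_map (counters : List (String × Int)) (reverse : Bool) (out : List (Int × Int)) : Prop := out = rank_map_alt counters reverse
instance (counters : List (String × Int)) (reverse : Bool) (out : List (Int × Int)) : Decidable (Spec_rank_map counters reverse out) := by unfold Spec_rank_map; infer_instance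

-- ===== CLAIM (what is proved, stated in full; the proofs are below) =====
def Claim_equal_rank_map : Prop := ∀ (counters : List (String × Int)) (reverse : Bool), Dom_rank_map counters reverse → Spec_rank_map counters reverse (rank_map counters reverse)

-- ===== LEMMAS AND PROOFS =====

-- Cumulative-count output: pairs (v, acc + count of v) along the distinct sorted values.
def pvCum (vals : List Int) : Int → List Int → List (Int × Int)
  | _, [] => []
  | acc, v :: t => (v, acc + (vals.count v : Int)) :: pvCum vals (acc + (vals.count v : Int)) t

-- The dict {v: 0 for v in s} answers 0 everywhere.
theorem pvGetD_foldl_insert_zero (s : List Int) (d : PySem.Dict Int Int)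
    (hd : ∀ k, d.getD k 0 = 0) (k : Int) :
    ((s.foldl (fun vc v => vc.insert v 0) d).getD k 0) = 0 := by
  induction s generalizing d with
  | nil => exact hd k
  | cons v t ih =>
      refine ih _ (fun k' => ?_)
      rw [PySem.Dict.getD_insert]
      split <;> simp [hd]

-- Adding already-present elements to a set changes nothing.
theorem pvSet_update_subset (l s : List Int) (h : ∀ x ∈ l, x ∈ s) :
    PySem.Set.update s l = s := by
  induction l generalizing s with
  | nil => rfl
  | cons x t ih =>
      have hx : PySem.Set.add s x = s := by
        simp [PySem.Set.add, PySem.Set.contains, List.contains_eq_mem, h x (by simp)]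
      show PySem.Set.update (PySem.Set.add s x) t = s
      rw [hx]
      exact ih s (fun y hy => h y (by simp [hy]))

-- A's second loop, rephrased on consecutive pairs: the running invariant.
theorem pvLoop2 (vals : List Int) (rest : List Int) :
    ∀ (p a : Int) (vc : PySem.Dict Int Int),
    vc.getD p 0 = a →
    (∀ v ∈ rest, vc.getD v 0 = (vals.count v : Int)) →
    (∀ v ∈ rest, 0 < vals.count v) →
    (p :: rest).Nodup →
    ((((p :: rest).zip rest).foldl
        (fun vc pr => vc.modify pr.2 0 (fun x => x + vc.getD pr.1 0)) vc).keys = vc.keys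
     ∧ (∀ k, k ∉ (p :: rest) → (((p :: rest).zip rest).foldl
        (fun vc pr => vc.modify pr.2 0 (fun x => x + vc.getD pr.1 0)) vc).getD k 0 = vc.getD k 0)
     ∧ ((p :: rest).map (fun v => (v, (((p :: rest).zip rest).foldl
        (fun vc pr => vc.modify pr.2 0 (fun x => x + vc.getD pr.1 0)) vc).getD v 0)))
        = (p, a) :: pvCum vals a rest) := by
  induction rest with
  | nil =>
      intro p a vc hp _ _ _
      exact ⟨rfl, fun k _ => rfl, by simp [pvCum, hp]⟩
  | cons q t ih =>
      intro p a vc hp hv hpos hnd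
      have hqt : q ∉ t := (List.nodup_cons.mp (List.nodup_cons.mp hnd).2).1
      have hpq : p ≠ q := by
        intro h
        exact (List.nodup_cons.mp hnd).1 (by rw [h]; exact List.mem_cons_self ..)
      have hpnt : p ∉ t := fun h => (List.nodup_cons.mp hnd).1 (List.mem_cons_of_mem _ h)
      have hqv : vc.getD q 0 = (vals.count q : Int) := hv q (List.mem_cons_self ..)
      have hcont : vc.contains q = true := by
        rcases hb : vc.contains q with _ | _
        · exfalso
          have := PySem.Dict.getD_of_not_contains vc (0 : Int) hb
          rw [this] at hqv
          have := hpos q (List.mem_cons_self ..)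
          omega
        · rfl
      simp only [List.zip_cons_cons, List.foldl_cons]
      have hstep : vc.modify q 0 (fun x => x + vc.getD p 0)
          = vc.modify q 0 (fun x => x + a) := by rw [hp]
      rw [hstep]
      obtain ⟨hk, hout, hmap⟩ := ih q (a + (vals.count q : Int)) (vc.modify q 0 (fun x => x + a))
        (by rw [PySem.Dict.getD_modify_self, hqv]; ring)
        (fun v hvt => by
          rw [PySem.Dict.getD_modify_of_ne _ _ _ (by intro h; exact hqt (by rw [← h]; exact hvt))]
          exact hv v (List.mem_cons_of_mem _ hvt))
        (fun v hvt => hpos v (List.mem_cons_of_mem _ hvt))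
        ((List.nodup_cons.mp hnd).2)
      refine ⟨?_, ?_, ?_⟩
      · rw [hk, PySem.Dict.keys_modify, PySem.Dict.keys_insert_of_contains _ _ hcont]
      · intro k hkmem
        have hknq : k ≠ q := by
          intro h
          exact hkmem (by rw [h]; exact List.mem_cons_of_mem _ (List.mem_cons_self ..))
        rw [hout k (fun h => hkmem (List.mem_cons_of_mem _ h)),
          PySem.Dict.getD_modify_of_ne _ _ _ hknq]
      · rw [List.map_cons, hmap]
        have hpfix : (((q :: t).zip t).foldl
            (fun vc pr => vc.modify pr.2 0 (fun x => x + vc.getD pr.1 0))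
            (vc.modify q 0 (fun x => x + a))).getD p 0 = a := by
          rw [hout p (by simp [hpq, hpnt]), PySem.Dict.getD_modify_of_ne _ _ _ hpq, hp]
        rw [hpfix]
        rfl

-- range(1, len xs) of the index pairs (xs[i-1], xs[i]) is zip xs (tail xs).
theorem pvZipRange (xs : List Int) :
    (PySem.List.pyRange 1 (xs.length : Int) 1).map
      (fun i => (PySem.List.pyGetD xs (i - 1) 0, PySem.List.pyGetD xs i 0))
    = xs.zip xs.tail := by
  apply List.ext_getElem
  · simp [PySem.List.length_pyRange_one, List.length_tail]
  · intro k h1 h2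
    have hk : k + 1 < xs.length := by
      simp [List.length_tail] at h2
      omega
    simp only [List.getElem_map]
    rw [PySem.List.getElem_pyRange_one]
    have e1 : (1 : Int) + (k : Int) - 1 = ((k : Nat) : Int) := by ring
    have e2 : (1 : Int) + (k : Int) = (((k + 1 : Nat)) : Int) := by push_cast; ring
    rw [e1, e2, PySem.List.pyGetD_natCast, PySem.List.pyGetD_natCast]
    rw [List.getElem_zip, List.getElem_tail]
    rw [List.getD_eq_getElem _ _ (by omega), List.getD_eq_getElem _ _ hk]

-- counts inside a flatten of replicates over a nodup spine
theorem pvCount_flatten (s : List Int) (c : Int → Nat) (hnd : s.Nodup) (x : Int) :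
    ((s.map (fun v => List.replicate (c v) v)).flatten).count x
      = if x ∈ s then c x else 0 := by
  induction s with
  | nil => simp
  | cons v t ih =>
      simp only [List.map_cons, List.flatten_cons, List.count_append, List.nodup_cons] at *
      rcases hnd with ⟨hv, ht⟩
      rw [ih ht, List.count_replicate]
      by_cases hxv : x = v
      · subst hxv; simp [hv]
      · simp [hxv, Ne.symm hxv]

-- On Int lists, reverse-sorting is reversing the sort (ties are identical values).
theorem pvSorted_rev_eq_reverse (xs : List Int) :
    PySem.List.sorted xs (fun x => x) true = (PySem.List.sorted xs (fun x => x) false).reverse := by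
  have h := PySem.List.sorted_id_eq_of_perm_of_pairwise xs (PySem.List.sorted xs (fun x => x) true).reverse
    (List.reverse_perm _ |>.trans (PySem.List.sorted_perm xs _ true))
    (by
      rw [List.pairwise_reverse]
      exact PySem.List.sorted_pairwise_rev xs (fun x => x))
  rw [h, List.reverse_reverse]

-- sorted-with-duplicates is the flatten of count-replicates over the sorted distinct values.
theorem pvSorted_flatten (vals : List Int) (rev : Bool) :
    PySem.List.sorted vals (fun x => x) rev
      = ((PySem.List.sorted (PySem.Set.ofList vals) (fun x => x) rev).map
          (fun v => List.replicate (vals.count v) v)).flatten := by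
  have hndS0 : (PySem.List.sorted (PySem.Set.ofList vals) (fun x => x) false).Nodup :=
    ((PySem.List.sorted_perm _ _ _).nodup_iff).mpr (PySem.Set.nodup_ofList vals)
  have hpw0 := PySem.List.sorted_ofList_pairwise_lt (κ := Int) vals
  have hcount : ∀ x, List.count x
      (((PySem.List.sorted (PySem.Set.ofList vals) (fun x => x) false).map
        (fun v => List.replicate (vals.count v) v)).flatten) = List.count x vals := by
    intro x
    rw [pvCount_flatten _ _ hndS0]
    by_cases hx : x ∈ PySem.List.sorted (PySem.Set.ofList vals) (fun x => x) false
    · simp [hx]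
    · have hxv : x ∉ vals := fun hv =>
        hx ((PySem.List.mem_sorted _ _ _ _).mpr ((PySem.Set.mem_ofList vals x).mpr hv))
      simp [hx, List.count_eq_zero.mpr hxv]
  have hperm : (((PySem.List.sorted (PySem.Set.ofList vals) (fun x => x) false).map
      (fun v => List.replicate (vals.count v) v)).flatten).Perm vals :=
    List.perm_iff_count.mpr (fun a => hcount a)
  have hfalse : PySem.List.sorted vals (fun x => x) false
      = ((PySem.List.sorted (PySem.Set.ofList vals) (fun x => x) false).map
          (fun v => List.replicate (vals.count v) v)).flatten := by
    refine PySem.List.sorted_id_eq_of_perm_of_pairwise vals _ hperm ?_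
    rw [List.pairwise_flatten]
    constructor
    · intro l hl
      simp only [List.mem_map] at hl
      obtain ⟨v, _, rfl⟩ := hl
      exact List.pairwise_replicate.mpr (Or.inr le_rfl)
    · rw [List.pairwise_map]
      exact hpw0.imp (fun {a b} h => fun x hx y hy => by
        rw [List.eq_of_mem_replicate hx, List.eq_of_mem_replicate hy]; exact le_of_lt h)
  cases rev with
  | false => exact hfalse
  | true =>
      rw [pvSorted_rev_eq_reverse, pvSorted_rev_eq_reverse, hfalse, List.map_reverse,
        List.flatten_reverse, List.map_map]
      simp [Function.comp_def, List.reverse_replicate]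

-- B's fold over one replicate block
theorem pvFold_replicate (c : Nat) (v : Int) (d : PySem.Dict Int Int) (r : Int) (hc : 0 < c) :
    ((List.replicate c v).foldl (fun st p => (st.1.insert p (st.2 + 1), st.2 + 1))
        (d, r) : PySem.Dict Int Int × Int)
      = (d.insert v (r + (c : Int)), r + (c : Int)) := by
  induction c generalizing d r with
  | zero => omega
  | succ n ih =>
      rw [List.replicate_succ, List.foldl_cons]
      rcases Nat.eq_zero_or_pos n with hn | hn
      · subst hn; simp
      · rw [ih _ _ hn, PySem.Dict.insert_insert_self]
        have : r + 1 + (n : Int) = r + ((n : Nat) + 1 : Nat) := by push_cast; ring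
        simp [this]

-- B's fold over the flattened blocks builds pvCum.
theorem pvFoldB (vals : List Int) (s : List Int) :
    ∀ (d : PySem.Dict Int Int) (r : Int),
    s.Nodup → (∀ v ∈ s, v ∈ vals) → (∀ v ∈ s, v ∉ d.keys) →
    (((s.map (fun v => List.replicate (vals.count v) v)).flatten.foldl
        (fun st p => (st.1.insert p (st.2 + 1), st.2 + 1)) (d, r)).1.items
      = d.items ++ pvCum vals r s) := by
  induction s with
  | nil => intro d r _ _ _; simp [pvCum]
  | cons v t ih =>
      intro d r hnd hmem hdisj
      have hc : 0 < vals.count v := List.count_pos_iff.mpr (hmem v (List.mem_cons_self ..))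
      have hcont : d.contains v = false := by
        rw [PySem.Dict.contains_eq_decide_mem_keys]
        exact decide_eq_false (hdisj v (List.mem_cons_self ..))
      simp only [List.map_cons, List.flatten_cons, List.foldl_append]
      rw [pvFold_replicate _ _ _ _ hc]
      rw [ih (d.insert v (r + (vals.count v : Int))) (r + (vals.count v : Int))
        (List.nodup_cons.mp hnd).2
        (fun x hx => hmem x (List.mem_cons_of_mem _ hx))
        (fun x hx => by
          rw [PySem.Dict.keys_insert_of_not_contains _ _ hcont]
          intro hmemx
          rcases List.mem_append.mp hmemx with h | h
          · exact hdisj x (List.mem_cons_of_mem _ hx) h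
          · exact (List.nodup_cons.mp hnd).1 (by
              have : x = v := by simpa using h
              rw [← this]; exact hx)),
        PySem.Dict.items_insert_of_not_contains _ _ hcont, List.append_assoc]
      rfl

-- A's side equals pvCum.
theorem pvA (counters : List (String × Int)) (reverse : Bool) :
    rank_map counters reverse
      = pvCum (PySem.Dict.values (PySem.Dict.ofList counters)) 0
          (PySem.List.sorted (PySem.Set.ofList (PySem.Dict.values (PySem.Dict.ofList counters))) (fun x => x) reverse) := by
  simp only [rank_map]
  set d := PySem.Dict.ofList counters with hd
  set vals := PySem.Dict.values d with hvals
  set s := PySem.List.sorted (PySem.Set.ofList vals) (fun x => x) reverse with hs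
  have hnds : s.Nodup := by
    rw [hs]
    exact ((PySem.List.sorted_perm _ _ _).nodup_iff).mpr (PySem.Set.nodup_ofList _)
  have hmems : ∀ v ∈ s, v ∈ vals := fun v hv => by
    rw [hs] at hv
    exact (PySem.Set.mem_ofList _ _).mp ((PySem.List.mem_sorted _ _ _ _).mp hv)
  have hmems' : ∀ v ∈ vals, v ∈ s := fun v hv => by
    rw [hs]
    exact (PySem.List.mem_sorted _ _ _ _).mpr ((PySem.Set.mem_ofList _ _).mpr hv)
  have hpos : ∀ v ∈ s, 0 < vals.count v := fun v hv => List.count_pos_iff.mpr (hmems v hv)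
  set vc0 := s.foldl (fun vc v => vc.insert v (0 : Int)) PySem.Dict.empty with hvc0
  have h0 : ∀ k, vc0.getD k 0 = 0 :=
    pvGetD_foldl_insert_zero s _ (fun k => PySem.Dict.getD_empty k 0)
  have hk0 : vc0.keys = s := by
    rw [hvc0, PySem.Dict.keys_foldl_insert s (fun _ _ => (0 : Int)) PySem.Dict.empty,
      PySem.Dict.keys_empty, PySem.Set.update_nil_left, PySem.Set.ofList_eq_self_of_nodup s hnds]
  have hfold1 : (PySem.Dict.keys d).foldl
      (fun vc i => vc.modify (PySem.Dict.getD d i 0) 0 (fun x => x + 1)) vc0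
      = vals.foldl (fun vc x => vc.modify x 0 (fun x => x + 1)) vc0 := by
    rw [hvals, PySem.Dict.values_eq_map_keys d (by rw [hd]; exact PySem.Dict.nodup_keys_ofList counters) 0,
      List.foldl_map]
  set vc1 := (PySem.Dict.keys d).foldl
      (fun vc i => vc.modify (PySem.Dict.getD d i 0) 0 (fun x => x + 1)) vc0 with hvc1
  have h1 : ∀ k, vc1.getD k 0 = (vals.count k : Int) := fun k => by
    rw [hfold1, PySem.Dict.getD_foldl_modify_add_one, h0, zero_add]
  have hk1 : vc1.keys = s := by
    rw [hfold1, PySem.Dict.keys_foldl_modify vals 0 (fun _ _ y => y + 1) vc0, hk0,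
      pvSet_update_subset vals s hmems']
  set vc2 := (PySem.List.pyRange 1 (s.length : Int) 1).foldl
      (fun vc i =>
        vc.modify (PySem.List.pyGetD s i 0) 0
          (fun x => x + PySem.Dict.getD vc (PySem.List.pyGetD s (i - 1) 0) 0)) vc1 with hvc2
  have hzip : vc2 = (s.zip s.tail).foldl
      (fun vc pr => vc.modify pr.2 0 (fun x => x + vc.getD pr.1 0)) vc1 := by
    rw [hvc2, ← pvZipRange s, List.foldl_map]
  cases hse : s with
  | nil =>
      have hk2 : vc2.keys = [] := by rw [hzip, hse]; simpa using hk1.trans hse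
      have : vc2.items = [] := by
        rw [PySem.Dict.items_eq_map_keys vc2 (by rw [hk2]; exact List.nodup_nil) 0, hk2]
        rfl
      rw [this]
      rfl
  | cons p rest =>
      obtain ⟨hk, _, hmap⟩ := pvLoop2 vals rest p (vals.count p : Int) vc1
        (h1 p)
        (fun v _ => h1 v)
        (fun v hv => hpos v (by rw [hse]; exact List.mem_cons_of_mem _ hv))
        (by rw [← hse]; exact hnds)
      have hzip' : vc2 = ((p :: rest).zip rest).foldl
          (fun vc pr => vc.modify pr.2 0 (fun x => x + vc.getD pr.1 0)) vc1 := by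
        rw [hzip, hse]; rfl
      have hk2 : vc2.keys = p :: rest := by rw [hzip', hk, hk1, hse]
      rw [PySem.Dict.items_eq_map_keys vc2 (by rw [hk2, ← hse]; exact hnds) 0, hk2]
      have : (p :: rest).map (fun k => (k, vc2.getD k 0))
          = (p, (vals.count p : Int)) :: pvCum vals (vals.count p : Int) rest := by
        rw [← hmap, ← hzip']
      rw [this]
      show _ = (p, 0 + (vals.count p : Int)) :: pvCum vals (0 + (vals.count p : Int)) rest
      rw [zero_add]

-- B's side equals pvCum.
theorem pvB (counters : List (String × Int)) (reverse : Bool) :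
    rank_map_alt counters reverse
      = pvCum (PySem.Dict.values (PySem.Dict.ofList counters)) 0
          (PySem.List.sorted (PySem.Set.ofList (PySem.Dict.values (PySem.Dict.ofList counters))) (fun x => x) reverse) := by
  have hnd : (PySem.List.sorted (PySem.Set.ofList (PySem.Dict.values (PySem.Dict.ofList counters))) (fun x => x) reverse).Nodup :=
    ((PySem.List.sorted_perm _ _ _).nodup_iff).mpr (PySem.Set.nodup_ofList _)
  simp only [rank_map_alt]
  rw [pvSorted_flatten]
  rw [pvFoldB _ _ PySem.Dict.empty 0 hnd
    (fun v hv => (PySem.Set.mem_ofList _ _).mp ((PySem.List.mem_sorted _ _ _ _).mp hv))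
    (fun v _ => by rw [PySem.Dict.keys_empty]; exact List.not_mem_nil)]
  rfl

-- ===== VERDICT (by name: the statement is the Claim_ definition above) =====
theorem rank_map_spec : Claim_equal_rank_map := by
  intro counters reverse _
  show rank_map counters reverse = rank_map_alt counters reverse
  rw [pvA, pvB]
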